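-- pv_equiv track=rewrite | github.com/ibragim077/test | laba 12/main.py | get_leader_string
-- ===== SOURCE A (Python) =====
-- def get_leader_string(steps: int) -> str:
--     result = ""
--     for i in range(steps + 1):
--         str = ""
--         for j in range(steps - i):
--             str += ' '
--         for j in range(i):
--             str += '#'
--         result += str + '\n'
--     return result
-- ===== SOURCE B (Python) =====
-- def get_leader_string(steps: int) -> str:
--     if steps < 0:
--         return ""
--     buf = [' '] * steps
--     lines = []
--     for i in range(steps + 1):
--         lines.append(''.join(buf) + '\n')
--         if i < steps:
--             buf[steps - 1 - i] = '#'
--     return ''.join(lines)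
-- ===== Notes on version B (the rewrite author's own statement) =====
-- stated objective: alternative
-- what changed: Replaces A's two inner character-by-character counting loops per line with one incrementally mutated char buffer (flip one space to '#' per iteration), collecting lines in a list and joining once instead of repeated string concatenation.
import Mathlib
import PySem

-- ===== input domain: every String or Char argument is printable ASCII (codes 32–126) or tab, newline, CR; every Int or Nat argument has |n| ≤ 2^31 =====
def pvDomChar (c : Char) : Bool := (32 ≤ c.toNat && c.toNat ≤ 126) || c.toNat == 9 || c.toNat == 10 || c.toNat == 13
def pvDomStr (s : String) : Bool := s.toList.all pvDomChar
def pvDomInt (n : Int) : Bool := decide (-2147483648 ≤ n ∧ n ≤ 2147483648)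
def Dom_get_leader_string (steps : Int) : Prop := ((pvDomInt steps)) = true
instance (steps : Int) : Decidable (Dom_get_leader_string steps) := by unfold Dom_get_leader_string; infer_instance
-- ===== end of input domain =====

-- B replaces A's per-line inner counting loops by one incrementally mutated
-- character buffer (flip one space to '#' per iteration) joined once at the end.


-- ===== PORT A =====
def get_leader_string (steps : Int) : String :=
  (PySem.List.pyRange 0 (steps + 1) 1).foldl (fun result i =>
    let s := (PySem.List.pyRange 0 (steps - i) 1).foldl (fun s _ => s ++ " ") ""
    let s := (PySem.List.pyRange 0 i 1).foldl (fun s _ => s ++ "#") s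
    result ++ (s ++ "\n")) ""

-- ===== PORT B =====
def get_leader_string_alt (steps : Int) : String :=
  if steps < 0 then "" else
    let st := (PySem.List.pyRange 0 (steps + 1) 1).foldl
      (fun (st : List Char × List String) i =>
        let lines := st.2 ++ [String.ofList st.1 ++ "\n"]
        let buf := if i < steps then st.1.set (steps - 1 - i).toNat '#' else st.1
        (buf, lines))
      (List.replicate steps.toNat ' ', [])
    String.join st.2

-- ===== PRECONDITION & SPEC =====
def Spec_get_leader_string (steps : Int) (out : String) : Prop := out = get_leader_string_alt steps
instance (steps : Int) (out : String) : Decidable (Spec_get_leader_string steps out) := by unfold Spec_get_leader_string; infer_instance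

-- ===== CLAIM (what is proved, stated in full; the proofs are below) =====
def Claim_equal_get_leader_string : Prop := ∀ (steps : Int), Dom_get_leader_string steps → Spec_get_leader_string steps (get_leader_string steps)

-- ===== LEMMAS AND PROOFS =====

-- reference: line i of an n-step ladder, as a char list
def pvLine (n i : Nat) : List Char := List.replicate (n - i) ' ' ++ List.replicate i '#' ++ ['\n']

theorem pv_foldl_toList (l : List String) (s : String) :
    (l.foldl (· ++ ·) s).toList = s.toList ++ (l.map String.toList).flatten := by
  induction l generalizing s with
  | nil => simp
  | cons h t ih => simp [ih]

theorem pv_toList_join (l : List String) :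
    (String.join l).toList = (l.map String.toList).flatten := by
  rw [show String.join l = l.foldl (· ++ ·) "" from rfl, pv_foldl_toList]
  simp

-- appending one constant character m times
theorem pv_foldl_const {α : Type} (l : List α) (c : String) (s : String) :
    (l.foldl (fun s _ => s ++ c) s).toList = s.toList ++ (List.replicate l.length c.toList).flatten := by
  induction l generalizing s with
  | nil => simp
  | cons h t ih => simp [ih, List.replicate_succ]

-- outer A-loop: accumulating string append is a join
theorem pv_foldl_lines {α : Type} (l : List α) (g : α → String) (s : String) :
    (l.foldl (fun r i => r ++ g i) s).toList = s.toList ++ (l.map fun i => (g i).toList).flatten := by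
  induction l generalizing s with
  | nil => simp
  | cons h t ih => simp [ih]

theorem pyRange_nat (n : Nat) : PySem.List.pyRange 0 ((n:Int)+1) 1 = (List.range (n+1)).map (fun k : Nat => (k : Int)) := by
  rw [PySem.List.pyRange_one]
  have h : (((n:Int)+1) - 0).toNat = n + 1 := by omega
  rw [h]
  simp only [zero_add]

theorem pv_A_char (n : Nat) :
    (get_leader_string (n : Int)).toList = ((List.range (n + 1)).map (pvLine n)).flatten := by
  unfold get_leader_string
  rw [pyRange_nat, List.foldl_map, pv_foldl_lines]
  simp only [String.toList_empty, List.nil_append]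
  congr 1
  apply List.map_congr_left
  intro k hk
  rw [List.mem_range] at hk
  rw [String.toList_append, pv_foldl_const, pv_foldl_const]
  simp only [String.toList_empty, List.nil_append, PySem.List.length_pyRange_one]
  have h1 : (((n:Int) - (k:Int)) - 0).toNat = n - k := by omega
  have h2 : (((k:Int)) - 0).toNat = k := by omega
  rw [h1, h2]
  simp [pvLine]

theorem pv_set_rep (a b : Nat) (ha : 0 < a) :
    (List.replicate a ' ' ++ List.replicate b '#').set (a - 1) '#'
    = List.replicate (a - 1) ' ' ++ List.replicate (b + 1) '#' := by
  obtain ⟨a', rfl⟩ : ∃ a', a = a' + 1 := ⟨a - 1, by omega⟩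
  rw [List.replicate_succ']
  simp [List.replicate_succ]

theorem pv_B_inv (n m : Nat) (hm : m ≤ n + 1) :
    ((PySem.List.pyRange 0 (m : Int) 1).foldl
      (fun (st : List Char × List String) i =>
        let lines := st.2 ++ [String.ofList st.1 ++ "\n"]
        let buf := if i < (n:Int) then st.1.set ((n:Int) - 1 - i).toNat '#' else st.1
        (buf, lines))
      (List.replicate n ' ', []))
    = (List.replicate (n - m) ' ' ++ List.replicate (min m n) '#',
       (List.range m).map (fun i => String.ofList (List.replicate (n - i) ' ' ++ List.replicate i '#') ++ "\n")) := by
  induction m with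
  | zero =>
    rw [PySem.List.pyRange_one_eq_nil (by omega)]
    simp
  | succ m ih =>
    have hc : ((m + 1 : Nat) : Int) = (m : Int) + 1 := by push_cast; ring
    rw [hc, PySem.List.pyRange_one_succ_right (by omega), List.foldl_append, ih (by omega)]
    simp only [List.foldl_cons, List.foldl_nil]
    by_cases hmn : m < n
    · have hmin : min m n = m := by omega
      have hmin' : min (m + 1) n = m + 1 := by omega
      have hidx : ((n:Int) - 1 - (m:Int)).toNat = (n - m) - 1 := by omega
      rw [if_pos (by exact_mod_cast hmn)]
      simp only [hmin, hmin', hidx]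
      rw [Prod.mk.injEq]
      refine ⟨?_, ?_⟩
      · rw [pv_set_rep (n - m) m (by omega)]
        have he : n - m - 1 = n - (m + 1) := by omega
        rw [he]
      · rw [List.range_succ]
        simp
    · have hm' : m = n := by omega
      subst hm'
      rw [if_neg (by omega)]
      simp only [Nat.sub_self, List.replicate_zero, List.nil_append, Nat.min_self]
      rw [Prod.mk.injEq]
      refine ⟨?_, ?_⟩
      · have : min (m + 1) m = m := by omega
        rw [this]
        have : m - (m + 1) = 0 := by omega
        rw [this]
        simp
      · rw [List.range_succ]
        simp

theorem pv_B_char (n : Nat) :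
    (get_leader_string_alt (n : Int)).toList = ((List.range (n + 1)).map (pvLine n)).flatten := by
  unfold get_leader_string_alt
  rw [if_neg (by omega)]
  have ht : (n : Int).toNat = n := by omega
  have hc : ((n : Int) + 1) = (((n + 1 : Nat)) : Int) := by push_cast; ring
  rw [ht, hc, pv_B_inv n (n + 1) (by omega)]
  rw [pv_toList_join, List.map_map]
  congr 1
  apply List.map_congr_left
  intro k hk
  simp [pvLine]

theorem pv_neg (steps : Int) (h : steps < 0) :
    get_leader_string steps = get_leader_string_alt steps := by
  unfold get_leader_string get_leader_string_alt
  rw [PySem.List.pyRange_one_eq_nil (by omega), if_pos h]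
  simp

-- ===== VERDICT (by name: the statement is the Claim_ definition above) =====
theorem get_leader_string_spec : Claim_equal_get_leader_string := by
  intro steps _
  unfold Spec_get_leader_string
  rcases lt_or_ge steps 0 with h | h
  · exact pv_neg steps h
  · obtain ⟨n, rfl⟩ := Int.eq_ofNat_of_zero_le h
    exact String.ext ((pv_A_char n).trans (pv_B_char n).symm)
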